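-- pv_equiv track=rewrite | github.com/kelvinhuang0327/number-pattern-research | tools/p3_39lotto_shuffle_test.py | cold_twin_predict
-- ===== SOURCE A (Python) =====
-- POOL = 39
--
-- PICK = 5
--
-- def cold_twin_predict(history, window=100, n=PICK):
--     if len(history) < 10:
--         return list(range(1, n + 1))
--     recent = history[-window:] if len(history) >= window else history
--     last_seen = {}
--     for i, d in enumerate(recent):
--         for num in d['numbers']:
--             last_seen[num] = i
--     current = len(recent)
--     gaps = {}
--     for num in range(1, POOL + 1):
--         gaps[num] = current - last_seen.get(num, -1)
--     ranked = sorted(gaps.items(), key=lambda x: (-x[1], x[0]))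
--     return sorted([x[0] for x in ranked[:n]])
-- ===== SOURCE B (Python) =====
-- POOL = 39
--
-- PICK = 5
--
-- def cold_twin_predict(history, window=100, n=PICK):
--     if len(history) < 10:
--         return list(range(1, n + 1))
--     recent = history[-window:] if len(history) >= window else history
--     # Bucket construction instead of gap computation + key-sort: scan draws
--     # newest-to-oldest; the pool numbers first sighted at each draw form one
--     # recency bucket.  The cold-first ranking is then: never-seen pool numbers
--     # (ascending) followed by the buckets from oldest sighting to newest, each
--     # ascending.  No per-number gap is computed and nothing is sorted by key.
--     seen = set()
--     buckets = []
--     for d in reversed(recent):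
--         fresh = []
--         for num in d['numbers']:
--             if 1 <= num <= POOL and num not in seen:
--                 seen.add(num)
--                 fresh.append(num)
--         buckets.append(sorted(fresh))
--     ranking = [num for num in range(1, POOL + 1) if num not in seen]
--     for b in reversed(buckets):
--         ranking += b
--     return sorted(ranking[:n])
-- ===== Notes on version B (the rewrite author's own statement) =====
-- stated objective: alternative
-- what changed: Replaces A's per-number gap computation and key-sort of all 39 (number, gap) pairs by a bucket construction: one newest-to-oldest scan groups pool numbers by the draw of their most recent appearance, and the cold-first ranking is read off directly as the never-seen numbers followed by the buckets oldest-first; no gaps dict and no comparison key-sort of the pool.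
import Mathlib
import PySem

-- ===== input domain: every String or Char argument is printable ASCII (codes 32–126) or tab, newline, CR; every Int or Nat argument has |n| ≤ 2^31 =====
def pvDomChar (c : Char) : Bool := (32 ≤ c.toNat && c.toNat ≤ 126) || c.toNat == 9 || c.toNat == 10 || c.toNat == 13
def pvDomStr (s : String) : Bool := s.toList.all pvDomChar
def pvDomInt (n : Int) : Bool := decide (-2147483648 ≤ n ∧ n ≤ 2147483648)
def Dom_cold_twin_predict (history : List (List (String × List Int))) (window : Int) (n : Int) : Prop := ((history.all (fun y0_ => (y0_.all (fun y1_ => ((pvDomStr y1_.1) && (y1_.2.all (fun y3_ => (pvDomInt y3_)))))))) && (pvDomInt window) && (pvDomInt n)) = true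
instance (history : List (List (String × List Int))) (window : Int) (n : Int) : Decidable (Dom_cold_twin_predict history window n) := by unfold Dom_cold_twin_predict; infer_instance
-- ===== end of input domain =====

-- B replaces A's gap computation and key-sort of all 39 (number, gap) pairs by a bucket
-- construction: a newest-to-oldest scan groups the pool numbers by the draw of their most
-- recent appearance, and the cold-first ranking is read off as unseen numbers followed by
-- the buckets oldest-first (alternative algorithm, same asymptotic cost).

-- ===== PORT A =====
def cold_twin_predict (history : List (List (String × List Int))) (window : Int) (n : Int) : List Int :=
  if PySem.List.len history < 10 then
    PySem.List.pyRange 1 (n + 1) 1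
  else
    let recent := if PySem.List.len history ≥ window then PySem.List.slice history (some (-window)) none else history
    -- d['numbers'] raises KeyError when absent; Pre_ excludes that, so getD [] is exact under Pre_
    let last_seen : PySem.Dict Int Int := (PySem.List.enumerate recent 0).foldl
      (fun ls p => ((PySem.Dict.mk p.2).getD "numbers" []).foldl (fun a num => a.insert num p.1) ls)
      PySem.Dict.empty
    let current : Int := PySem.List.len recent
    let gaps : PySem.Dict Int Int := (PySem.List.pyRange 1 (39 + 1) 1).foldl
      (fun g num => g.insert num (current - last_seen.getD num (-1))) PySem.Dict.empty
    let ranked := PySem.List.sorted2 gaps.items (fun x => -x.2) (fun x => x.1) false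
    PySem.List.sorted ((PySem.List.slice ranked none (some n)).map (fun x => x.1)) (fun x => x) false

-- ===== PORT B =====
-- the body of B's inner 'for num in d["numbers"]' loop
def pvInnerStep (q : PySem.Set Int × List Int) (num : Int) : PySem.Set Int × List Int :=
  if 1 ≤ num ∧ num ≤ 39 ∧ PySem.Set.contains q.1 num = false then
    (PySem.Set.add q.1 num, q.2 ++ [num])
  else q

-- the body of B's 'for d in reversed(recent)' loop
-- (d['numbers'] raises KeyError when absent; Pre_ excludes that, so getD [] is exact under Pre_)
def pvDrawStep (st : PySem.Set Int × List (List Int)) (d : List (String × List Int)) :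
    PySem.Set Int × List (List Int) :=
  let p := ((PySem.Dict.mk d).getD "numbers" []).foldl pvInnerStep (st.1, ([] : List Int))
  (p.1, st.2 ++ [PySem.List.sorted p.2 (fun x => x) false])

def cold_twin_predict_alt (history : List (List (String × List Int))) (window : Int) (n : Int) : List Int :=
  if PySem.List.len history < 10 then
    PySem.List.pyRange 1 (n + 1) 1
  else
    let recent := if PySem.List.len history ≥ window then PySem.List.slice history (some (-window)) none else history
    let sb := recent.reverse.foldl pvDrawStep ((PySem.Set.empty : PySem.Set Int), ([] : List (List Int)))
    let unseen := (PySem.List.pyRange 1 (39 + 1) 1).filter (fun num => !PySem.Set.contains sb.1 num)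
    let ranking := sb.2.reverse.foldl (fun r b => r ++ b) unseen
    PySem.List.sorted (PySem.List.slice ranking none (some n)) (fun x => x) false

-- ===== PRECONDITION & SPEC =====
-- Pre_ excludes exactly the inputs where Python A raises KeyError: some dict in the
-- examined window (only reached when len(history) ≥ 10) has no 'numbers' key.
def Pre_cold_twin_predict (history : List (List (String × List Int))) (window : Int) (n : Int) : Prop :=
  PySem.List.len history < 10 ∨
  ∀ d ∈ (if PySem.List.len history ≥ window then PySem.List.slice history (some (-window)) none else history),
    (PySem.Dict.mk d).contains "numbers" = true
instance (history : List (List (String × List Int))) (window : Int) (n : Int) : Decidable (Pre_cold_twin_predict history window n) := by unfold Pre_cold_twin_predict; infer_instance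

def pvWitness_cold_twin_predict : (List (List (String × List Int))) × Int × Int :=
  (List.replicate 10 [("numbers", ([1, 2] : List Int))], 100, 5)

def Spec_cold_twin_predict (history : List (List (String × List Int))) (window : Int) (n : Int) (out : List Int) : Prop := out = cold_twin_predict_alt history window n
instance (history : List (List (String × List Int))) (window : Int) (n : Int) (out : List Int) : Decidable (Spec_cold_twin_predict history window n out) := by unfold Spec_cold_twin_predict; infer_instance

-- ===== CLAIM (what is proved, stated in full; the proofs are below) =====
def Claim_equal_cold_twin_predict : Prop := ∀ (history : List (List (String × List Int))) (window : Int) (n : Int), Dom_cold_twin_predict history window n → Pre_cold_twin_predict history window n → Spec_cold_twin_predict history window n (cold_twin_predict history window n)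

-- ===== LEMMAS AND PROOFS =====

-- the 'numbers' list of a draw-dict (as both ports read it)
def pvNums (d : List (String × List Int)) : List Int := (PySem.Dict.mk d).getD "numbers" []

-- index of the LAST draw containing num
def pvLastIdx (xs : List (List (String × List Int))) (num : Int) : Option Nat :=
  match xs with
  | [] => none
  | d :: t =>
    match pvLastIdx t num with
    | some k => some (k + 1)
    | none => if num ∈ pvNums d then some 0 else none

-- index of the FIRST draw containing num
def pvFirstIdx (xs : List (List (String × List Int))) (num : Int) : Option Nat :=
  match xs with
  | [] => none
  | d :: t => if num ∈ pvNums d then some 0 else (pvFirstIdx t num).map (· + 1)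

-- A's gap value for a pool number, expressed through the last-occurrence index
def pvG (r : List (List (String × List Int))) (x : Int) : Int :=
  match pvLastIdx r x with
  | some k => (r.length : Int) - k
  | none => (r.length : Int) + 1

-- the strict "colder-first" order on (number, gap) pairs that A's sorted2 key induces
def pvR (a b : Int × Int) : Prop := b.2 < a.2 ∨ (a.2 = b.2 ∧ a.1 < b.1)

-- B's seen-set and bucket list after the reverse scan, in recursive form
def pvSeen (xs : List (List (String × List Int))) (s : PySem.Set Int) : PySem.Set Int :=
  match xs with
  | [] => s
  | d :: t => pvSeen t ((pvNums d).foldl pvInnerStep (s, ([] : List Int))).1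

def pvBuckets (xs : List (List (String × List Int))) (s : PySem.Set Int) : List (List Int) :=
  match xs with
  | [] => []
  | d :: t =>
    let p := (pvNums d).foldl pvInnerStep (s, ([] : List Int))
    PySem.List.sorted p.2 (fun x => x) false :: pvBuckets t p.1

-- B's final ranking list
def pvRanking (r : List (List (String × List Int))) : List Int :=
  ((PySem.List.pyRange 1 (39 + 1) 1).filter
      (fun num => !PySem.Set.contains (pvSeen r.reverse PySem.Set.empty) num))
    ++ (pvBuckets r.reverse PySem.Set.empty).reverse.flatten

theorem pvLastIdx_lt (xs : List (List (String × List Int))) (num : Int) (k : Nat)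
    (h : pvLastIdx xs num = some k) : k < xs.length := by
  induction xs generalizing k with
  | nil => simp [pvLastIdx] at h
  | cons d t ih =>
    cases hl : pvLastIdx t num with
    | some j =>
      simp only [pvLastIdx, hl, Option.some.injEq] at h
      have := ih j hl
      simp only [List.length_cons]; omega
    | none =>
      simp only [pvLastIdx, hl] at h
      by_cases hm : num ∈ pvNums d
      · rw [if_pos hm] at h
        simp only [Option.some.injEq] at h
        simp only [List.length_cons]; omega
      · rw [if_neg hm] at h; exact absurd h (by simp)

theorem pvFirstIdx_lt (xs : List (List (String × List Int))) (num : Int) (k : Nat)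
    (h : pvFirstIdx xs num = some k) : k < xs.length := by
  induction xs generalizing k with
  | nil => simp [pvFirstIdx] at h
  | cons d t ih =>
    by_cases hm : num ∈ pvNums d
    · simp only [pvFirstIdx, if_pos hm, Option.some.injEq] at h
      simp only [List.length_cons]; omega
    · simp only [pvFirstIdx, if_neg hm] at h
      cases hf : pvFirstIdx t num with
      | some j =>
        rw [hf] at h
        simp only [Option.map_some, Option.some.injEq] at h
        have := ih j hf
        simp only [List.length_cons]; omega
      | none => rw [hf] at h; simp at h

theorem pv_innerA (ns : List Int) (acc : PySem.Dict Int Int) (i x : Int) :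
    (ns.foldl (fun a num => a.insert num i) acc).get? x
      = if x ∈ ns then some i else acc.get? x := by
  induction ns generalizing acc with
  | nil => simp
  | cons m t ih =>
    simp only [List.foldl_cons, ih, List.mem_cons]
    by_cases h : x ∈ t
    · simp [h]
    · simp [h, PySem.Dict.get?_insert]

theorem pv_charA (xs : List (List (String × List Int))) (s : Int) (d0 : PySem.Dict Int Int) (num : Int) :
    ((PySem.List.enumerate xs s).foldl
        (fun ls p => (pvNums p.2).foldl (fun a nm => a.insert nm p.1) ls) d0).get? num
      = match pvLastIdx xs num with
        | some k => some (s + k)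
        | none => d0.get? num := by
  induction xs generalizing s d0 with
  | nil => simp [pvLastIdx, PySem.List.enumerate_nil]
  | cons d t ih =>
    rw [PySem.List.enumerate_cons, List.foldl_cons, ih]
    cases hl : pvLastIdx t num with
    | some k =>
      simp only [pvLastIdx, hl, Option.some.injEq]
      push_cast; ring
    | none =>
      simp only [pvLastIdx, hl]
      rw [pv_innerA]
      by_cases hm : num ∈ pvNums d <;> simp [hm]

-- A's gap expression equals pvG
theorem pv_gapA_eq (r : List (List (String × List Int))) (num : Int) :
    (PySem.List.len r) -
      (((PySem.List.enumerate r 0).foldl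
          (fun ls p => ((PySem.Dict.mk p.2).getD "numbers" []).foldl (fun a nm => a.insert nm p.1) ls)
          PySem.Dict.empty).getD num (-1))
      = pvG r num := by
  rw [PySem.Dict.getD_eq_get?_getD]
  have h := pv_charA r 0 PySem.Dict.empty num
  simp only [pvNums] at h
  rw [h]
  cases hl : pvLastIdx r num with
  | some k => simp [pvG, hl, PySem.List.len_eq]
  | none => simp [pvG, hl, PySem.List.len_eq]

theorem pvFirstIdx_append (as bs : List (List (String × List Int))) (num : Int) :
    pvFirstIdx (as ++ bs) num
      = match pvFirstIdx as num with
        | some k => some k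
        | none => (pvFirstIdx bs num).map (· + as.length) := by
  induction as with
  | nil => simp [pvFirstIdx]
  | cons d t ih =>
    by_cases hm : num ∈ pvNums d
    · simp [pvFirstIdx, hm]
    · simp only [List.cons_append, pvFirstIdx, if_neg hm, ih]
      cases hf : pvFirstIdx t num with
      | some k => simp
      | none =>
        cases hb : pvFirstIdx bs num with
        | some k => simp [List.length_cons]; omega
        | none => simp

theorem pvFirstIdx_reverse (xs : List (List (String × List Int))) (num : Int) :
    pvFirstIdx xs.reverse num = (pvLastIdx xs num).map (fun k => xs.length - 1 - k) := by
  induction xs with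
  | nil => simp [pvFirstIdx, pvLastIdx]
  | cons d t ih =>
    rw [List.reverse_cons, pvFirstIdx_append, ih]
    cases hl : pvLastIdx t num with
    | some k =>
      have := pvLastIdx_lt t num k hl
      simp only [Option.map_some]
      unfold pvLastIdx
      rw [hl]
      simp only [Option.map_some, Option.some.injEq, List.length_cons]
      omega
    | none =>
      simp only [Option.map_none]
      unfold pvLastIdx
      rw [hl]
      by_cases hm : num ∈ pvNums d <;>
        simp [pvFirstIdx, hm, List.length_reverse]

-- pvG at an unseen / seen number (through the reversed first index)
theorem pv_g_unseen (r : List (List (String × List Int))) (x : Int)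
    (h : pvFirstIdx r.reverse x = none) : pvG r x = (r.length : Int) + 1 := by
  rw [pvFirstIdx_reverse] at h
  cases hl : pvLastIdx r x with
  | some k => rw [hl] at h; simp at h
  | none => simp [pvG, hl]

theorem pv_g_bucket (r : List (List (String × List Int))) (x : Int) (j : Nat)
    (h : pvFirstIdx r.reverse x = some j) : pvG r x = (j : Int) + 1 := by
  rw [pvFirstIdx_reverse] at h
  cases hl : pvLastIdx r x with
  | some k =>
    have hk := pvLastIdx_lt r x k hl
    rw [hl] at h
    simp only [Option.map_some, Option.some.injEq] at h
    simp only [pvG, hl]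
    omega
  | none => rw [hl] at h; simp at h

theorem pv_contains_iff (s : PySem.Set Int) (x : Int) :
    PySem.Set.contains s x = true ↔ x ∈ s := by
  simp [PySem.Set.contains]

-- inner loop: membership in the seen set afterwards
theorem pv_inner_seen (ns : List Int) (s : PySem.Set Int) (fr : List Int) (x : Int) :
    x ∈ (ns.foldl pvInnerStep (s, fr)).1 ↔ x ∈ s ∨ (x ∈ ns ∧ 1 ≤ x ∧ x ≤ 39) := by
  induction ns generalizing s fr with
  | nil => simp
  | cons m t ih =>
    simp only [List.foldl_cons, pvInnerStep]
    by_cases hc : 1 ≤ m ∧ m ≤ 39 ∧ PySem.Set.contains s m = false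
    · rw [if_pos hc]
      rw [ih]
      rw [PySem.Set.mem_add]
      simp only [List.mem_cons]
      constructor
      · rintro ((h | h) | h)
        · exact Or.inl h
        · exact Or.inr ⟨Or.inl h, by omega⟩
        · exact Or.inr ⟨Or.inr h.1, h.2⟩
      · rintro (h | ⟨(h | h), hp⟩)
        · exact Or.inl (Or.inl h)
        · exact Or.inl (Or.inr h)
        · exact Or.inr ⟨h, hp⟩
    · rw [if_neg hc]
      rw [ih]
      simp only [List.mem_cons]
      constructor
      · rintro (h | h)
        · exact Or.inl h
        · exact Or.inr ⟨Or.inr h.1, h.2⟩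
      · rintro (h | ⟨(h | h), hp⟩)
        · exact Or.inl h
        · subst h
          rcases Bool.eq_false_or_eq_true (PySem.Set.contains s x) with hb | hb
          · exact Or.inl ((pv_contains_iff s x).mp hb)
          · exact absurd ⟨hp.1, hp.2, hb⟩ hc
        · exact Or.inr ⟨h, hp⟩

-- inner loop: membership in the fresh list afterwards
theorem pv_inner_fresh (ns : List Int) (s : PySem.Set Int) (fr : List Int) (x : Int) :
    x ∈ (ns.foldl pvInnerStep (s, fr)).2 ↔ x ∈ fr ∨ (x ∈ ns ∧ 1 ≤ x ∧ x ≤ 39 ∧ x ∉ s) := by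
  induction ns generalizing s fr with
  | nil => simp
  | cons m t ih =>
    simp only [List.foldl_cons, pvInnerStep]
    by_cases hc : 1 ≤ m ∧ m ≤ 39 ∧ PySem.Set.contains s m = false
    · rw [if_pos hc]
      rw [ih]
      have hms : m ∉ s := fun hm => by
        have := (pv_contains_iff s m).mpr hm
        rw [hc.2.2] at this; exact absurd this (by simp)
      simp only [List.mem_append, List.mem_cons, List.not_mem_nil, or_false,
        PySem.Set.mem_add]
      constructor
      · rintro ((h | h) | ⟨ht, h1, h2, h3⟩)
        · exact Or.inl h
        · subst h; exact Or.inr ⟨Or.inl rfl, hc.1, hc.2.1, hms⟩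
        · exact Or.inr ⟨Or.inr ht, h1, h2, fun hx => h3 (Or.inl hx)⟩
      · rintro (h | ⟨(h | h), h1, h2, h3⟩)
        · exact Or.inl (Or.inl h)
        · subst h; exact Or.inl (Or.inr rfl)
        · by_cases hxm : x = m
          · subst hxm; exact Or.inl (Or.inr rfl)
          · exact Or.inr ⟨h, h1, h2, by rintro (hx | hx); exact h3 hx; exact hxm hx⟩
    · rw [if_neg hc]
      rw [ih]
      simp only [List.mem_cons]
      constructor
      · rintro (h | ⟨ht, h⟩)
        · exact Or.inl h
        · exact Or.inr ⟨Or.inr ht, h⟩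
      · rintro (h | ⟨(h | h), h1, h2, h3⟩)
        · exact Or.inl h
        · subst h
          rcases Bool.eq_false_or_eq_true (PySem.Set.contains s x) with hb | hb
          · exact absurd ((pv_contains_iff s x).mp hb) h3
          · exact absurd ⟨h1, h2, hb⟩ hc
        · exact Or.inr ⟨h, h1, h2, h3⟩

-- inner loop: the fresh list stays duplicate-free (its elements are in the seen set)
theorem pv_inner_nodup (ns : List Int) (s : PySem.Set Int) (fr : List Int)
    (hsub : ∀ x ∈ fr, x ∈ s) (hnd : fr.Nodup) :
    (ns.foldl pvInnerStep (s, fr)).2.Nodup := by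
  induction ns generalizing s fr with
  | nil => simpa
  | cons m t ih =>
    simp only [List.foldl_cons, pvInnerStep]
    by_cases hc : 1 ≤ m ∧ m ≤ 39 ∧ PySem.Set.contains s m = false
    · rw [if_pos hc]
      have hms : m ∉ s := fun hm => by
        have := (pv_contains_iff s m).mpr hm
        rw [hc.2.2] at this; exact absurd this (by simp)
      refine ih (PySem.Set.add s m) (fr ++ [m]) ?_ ?_
      · intro x hx
        rcases List.mem_append.mp hx with hx | hx
        · exact (PySem.Set.mem_add s m x).mpr (Or.inl (hsub x hx))
        · exact (PySem.Set.mem_add s m x).mpr (Or.inr (List.mem_singleton.mp hx))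
      · rw [List.nodup_append]
        refine ⟨hnd, List.nodup_singleton m, ?_⟩
        intro a ha b hbm
        rw [List.mem_singleton] at hbm
        subst hbm
        exact fun h => hms (h ▸ hsub a ha)
    · rw [if_neg hc]
      exact ih s fr hsub hnd

-- the outer fold is the recursive seen/buckets pair
theorem pv_fold_eq (xs : List (List (String × List Int))) (s : PySem.Set Int) (bs : List (List Int)) :
    xs.foldl pvDrawStep (s, bs) = (pvSeen xs s, bs ++ pvBuckets xs s) := by
  induction xs generalizing s bs with
  | nil => simp [pvSeen, pvBuckets]
  | cons d t ih =>
    simp only [List.foldl_cons, pvDrawStep, pvSeen, pvBuckets, pvNums]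
    rw [ih]
    simp

-- membership in the seen set after the whole scan
theorem pv_seen_mem (xs : List (List (String × List Int))) (s : PySem.Set Int) (x : Int) :
    x ∈ pvSeen xs s ↔ x ∈ s ∨ ((pvFirstIdx xs x).isSome ∧ 1 ≤ x ∧ x ≤ 39) := by
  induction xs generalizing s with
  | nil => simp [pvSeen, pvFirstIdx]
  | cons d t ih =>
    simp only [pvSeen]
    rw [ih, pv_inner_seen]
    simp only [pvFirstIdx]
    by_cases hm : x ∈ pvNums d
    · simp only [if_pos hm]
      constructor
      · rintro ((h | h) | h)
        · exact Or.inl h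
        · exact Or.inr ⟨by simp, h.2⟩
        · exact Or.inr ⟨by simp, h.2⟩
      · rintro (h | h)
        · exact Or.inl (Or.inl h)
        · exact Or.inl (Or.inr ⟨hm, h.2⟩)
    · simp only [if_neg hm]
      constructor
      · rintro ((h | h) | h)
        · exact Or.inl h
        · exact absurd h.1 hm
        · exact Or.inr ⟨by simpa using h.1, h.2⟩
      · rintro (h | h)
        · exact Or.inl (Or.inl h)
        · exact Or.inr ⟨by simpa using h.1, h.2⟩

theorem pv_buckets_length (xs : List (List (String × List Int))) (s : PySem.Set Int) :
    (pvBuckets xs s).length = xs.length := by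
  induction xs generalizing s with
  | nil => simp [pvBuckets]
  | cons d t ih => simp [pvBuckets, ih]

-- membership in bucket j
theorem pv_buckets_mem (xs : List (List (String × List Int))) (s : PySem.Set Int)
    (j : Nat) (hj : j < (pvBuckets xs s).length) (x : Int) :
    x ∈ (pvBuckets xs s)[j] ↔ (1 ≤ x ∧ x ≤ 39 ∧ x ∉ s ∧ pvFirstIdx xs x = some j) := by
  induction xs generalizing s j with
  | nil => simp [pvBuckets] at hj
  | cons d t ih =>
    cases j with
    | zero =>
      simp only [pvBuckets, List.getElem_cons_zero]
      rw [PySem.List.mem_sorted, pv_inner_fresh]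
      simp only [List.not_mem_nil, false_or, pvFirstIdx]
      constructor
      · rintro ⟨hm, h1, h2, h3⟩
        exact ⟨h1, h2, h3, by rw [if_pos hm]⟩
      · rintro ⟨h1, h2, h3, h4⟩
        by_cases hm : x ∈ pvNums d
        · exact ⟨hm, h1, h2, h3⟩
        · rw [if_neg hm] at h4
          cases hf : pvFirstIdx t x <;> rw [hf] at h4 <;> simp at h4
    | succ k =>
      simp only [pvBuckets, List.getElem_cons_succ]
      have hj' : k < (pvBuckets t ((pvNums d).foldl pvInnerStep (s, ([] : List Int))).1).length := by
        simp only [pvBuckets, List.length_cons] at hj; omega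
      rw [ih _ k hj']
      simp only [pvFirstIdx]
      constructor
      · rintro ⟨h1, h2, h3, h4⟩
        have hnm : x ∉ pvNums d := fun hm =>
          h3 ((pv_inner_seen _ _ _ _).mpr (Or.inr ⟨hm, h1, h2⟩))
        have hns : x ∉ s := fun hs =>
          h3 ((pv_inner_seen _ _ _ _).mpr (Or.inl hs))
        refine ⟨h1, h2, hns, ?_⟩
        rw [if_neg hnm, h4]
        rfl
      · rintro ⟨h1, h2, h3, h4⟩
        by_cases hm : x ∈ pvNums d
        · rw [if_pos hm] at h4; simp at h4
        · rw [if_neg hm] at h4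
          refine ⟨h1, h2, ?_, ?_⟩
          · intro hp
            rcases (pv_inner_seen _ _ _ _).mp hp with hs | ⟨hm', _⟩
            · exact h3 hs
            · exact hm hm'
          · cases hf : pvFirstIdx t x with
            | none => rw [hf] at h4; simp at h4
            | some v =>
              rw [hf] at h4
              simp only [Option.map_some, Option.some.injEq] at h4
              have hvk : v = k := by omega
              rw [hvk]

-- each bucket is strictly increasing
theorem pv_buckets_pairwise (xs : List (List (String × List Int))) (s : PySem.Set Int)
    (j : Nat) (hj : j < (pvBuckets xs s).length) :
    (pvBuckets xs s)[j].Pairwise (· < ·) := by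
  induction xs generalizing s j with
  | nil => simp [pvBuckets] at hj
  | cons d t ih =>
    cases j with
    | zero =>
      simp only [pvBuckets, List.getElem_cons_zero]
      have hnd : ((pvNums d).foldl pvInnerStep (s, ([] : List Int))).2.Nodup :=
        pv_inner_nodup (pvNums d) s [] (by simp) (List.nodup_nil)
      have hperm := PySem.List.sorted_perm ((pvNums d).foldl pvInnerStep (s, ([] : List Int))).2 (fun x => x) false
      have hnd' := hperm.symm.nodup hnd
      have hle := PySem.List.sorted_pairwise ((pvNums d).foldl pvInnerStep (s, ([] : List Int))).2 (fun x => x)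
      exact (hle.and hnd').imp (fun h => lt_of_le_of_ne h.1 h.2)
    | succ k =>
      simp only [pvBuckets, List.getElem_cons_succ]
      have hj' : k < (pvBuckets t ((pvNums d).foldl pvInnerStep (s, ([] : List Int))).1).length := by
        simp only [pvBuckets, List.length_cons] at hj; omega
      exact ih _ k hj'

-- a number in the unseen part of the ranking has the maximal gap
theorem pv_mem_unseen (r : List (List (String × List Int))) (x : Int)
    (hx : x ∈ (PySem.List.pyRange 1 (39 + 1) 1).filter
      (fun num => !PySem.Set.contains (pvSeen r.reverse PySem.Set.empty) num)) :
    (1 ≤ x ∧ x ≤ 39) ∧ pvG r x = (r.length : Int) + 1 := by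
  rcases List.mem_filter.mp hx with ⟨hr, hc⟩
  have hp : 1 ≤ x ∧ x ≤ 39 := by
    have := PySem.List.mem_pyRange_one.mp hr
    omega
  have hns : x ∉ pvSeen r.reverse PySem.Set.empty := by
    intro hmem
    have hb := (pv_contains_iff _ x).mpr hmem
    rw [Bool.not_eq_eq_eq_not, Bool.not_true] at hc
    rw [hb] at hc
    exact absurd hc (by simp)
  refine ⟨hp, ?_⟩
  apply pv_g_unseen
  cases hf : pvFirstIdx r.reverse x with
  | none => rfl
  | some j =>
    exfalso
    exact hns ((pv_seen_mem _ _ _).mpr (Or.inr ⟨by simp [hf], hp⟩))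

-- a number of bucket j (of the reversed scan) has gap j+1
theorem pv_mem_bucket (r : List (List (String × List Int))) (j : Nat)
    (hj : j < (pvBuckets r.reverse PySem.Set.empty).length) (x : Int)
    (hx : x ∈ (pvBuckets r.reverse PySem.Set.empty)[j]) :
    (1 ≤ x ∧ x ≤ 39) ∧ pvG r x = (j : Int) + 1 := by
  rcases (pv_buckets_mem _ _ j hj x).mp hx with ⟨h1, h2, _, h4⟩
  exact ⟨⟨h1, h2⟩, pv_g_bucket r x j h4⟩

-- ordering machinery for A's sorted2
def pvBef (a b : Int × Int) : Bool :=
  decide ((-a.2) < (-b.2)) || (!decide ((-b.2) < (-a.2)) && decide (a.1 < b.1))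

theorem pv_sorted2_eq (xs : List (Int × Int)) :
    PySem.List.sorted2 xs (fun x => -x.2) (fun x => x.1) false
      = xs.foldl (fun acc x => PySem.List.insertBy pvBef x acc) [] := rfl

theorem pv_bef_iff (a b : Int × Int) : pvBef a b = true ↔ pvR a b := by
  simp only [pvBef, pvR, Bool.or_eq_true, Bool.and_eq_true, Bool.not_eq_true',
    decide_eq_true_eq, decide_eq_false_iff_not]
  omega

theorem pv_insert_pairwise (x : Int × Int) (acc : List (Int × Int))
    (h : acc.Pairwise (fun a b => ¬ pvR b a)) :
    (PySem.List.insertBy pvBef x acc).Pairwise (fun a b => ¬ pvR b a) := by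
  induction acc with
  | nil => simp [PySem.List.insertBy]
  | cons y ys ih =>
    rw [PySem.List.insertBy]
    by_cases hxy : pvBef x y = true
    · rw [if_pos hxy]
      have hR : pvR x y := (pv_bef_iff x y).mp hxy
      refine List.Pairwise.cons ?_ h
      intro z hz
      rcases List.mem_cons.mp hz with rfl | hz
      · unfold pvR at hR ⊢; omega
      · have hzy : ¬ pvR z y := List.rel_of_pairwise_cons h hz
        unfold pvR at hR hzy ⊢; omega
    · rw [if_neg hxy]
      refine List.Pairwise.cons ?_ (ih h.of_cons)
      intro z hz
      rcases (PySem.List.mem_insertBy _ _ _ _).mp hz with rfl | hz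
      · intro hzy
        exact hxy ((pv_bef_iff _ y).mpr hzy)
      · exact List.rel_of_pairwise_cons h hz

theorem pv_foldl_insert_pairwise (xs acc : List (Int × Int))
    (h : acc.Pairwise (fun a b => ¬ pvR b a)) :
    (xs.foldl (fun acc x => PySem.List.insertBy pvBef x acc) acc).Pairwise
      (fun a b => ¬ pvR b a) := by
  induction xs generalizing acc with
  | nil => simpa
  | cons m t ih => exact ih _ (pv_insert_pairwise m acc h)

theorem pv_sorted2_pairwise (xs : List (Int × Int)) :
    (PySem.List.sorted2 xs (fun x => -x.2) (fun x => x.1) false).Pairwise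
      (fun a b => ¬ pvR b a) := by
  rw [pv_sorted2_eq]
  exact pv_foldl_insert_pairwise xs [] (by simp)

-- a strictly pvR-increasing rearrangement is THE sorted list
theorem pv_uniq (l2 : List (Int × Int)) : ∀ (l1 : List (Int × Int)), l1.Perm l2 →
    l1.Pairwise (fun a b => ¬ pvR b a) → l2.Pairwise pvR → l1 = l2 := by
  induction l2 with
  | nil =>
    intro l1 hp _ _
    exact hp.eq_nil
  | cons y t ih =>
    intro l1 hp h1 h2
    cases l1 with
    | nil => exact absurd hp.symm.eq_nil (by simp)
    | cons a t1 =>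
      have hay : a = y := by
        by_contra hne
        have ha : a ∈ y :: t := hp.mem_iff.mp (List.mem_cons_self ..)
        have hy : y ∈ a :: t1 := hp.symm.mem_iff.mp (List.mem_cons_self ..)
        rcases List.mem_cons.mp ha with h | ha'
        · exact hne h
        rcases List.mem_cons.mp hy with h | hy'
        · exact hne h.symm
        have hRya : pvR y a := List.rel_of_pairwise_cons h2 ha'
        exact (List.rel_of_pairwise_cons h1 hy') hRya
      subst hay
      have hp' : t1.Perm t := hp.cons_inv
      rw [ih t1 hp' h1.of_cons h2.of_cons]

-- the ranking is pairwise strictly colder-first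
theorem pv_ranking_pairwiseQ (r : List (List (String × List Int))) :
    (pvRanking r).Pairwise (fun x y => pvR (x, pvG r x) (y, pvG r y)) := by
  unfold pvRanking
  rw [List.pairwise_append]
  refine ⟨?_, ?_, ?_⟩
  · -- within the unseen block: equal gaps, increasing numbers
    have h0 : ((PySem.List.pyRange 1 (39 + 1) 1).filter
        (fun num => !PySem.Set.contains (pvSeen r.reverse PySem.Set.empty) num)).Pairwise (· < ·) :=
      List.Pairwise.sublist List.filter_sublist (PySem.List.pairwise_lt_pyRange_one 1 (39 + 1))
    refine h0.imp_of_mem ?_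
    intro a b ha hb hab
    have hga := (pv_mem_unseen r a ha).2
    have hgb := (pv_mem_unseen r b hb).2
    exact Or.inr ⟨by rw [hga, hgb], hab⟩
  · -- within the bucket block
    rw [List.pairwise_flatten]
    constructor
    · intro l hl
      rcases List.getElem_of_mem (List.mem_reverse.mp hl) with ⟨j, hj, rfl⟩
      refine (pv_buckets_pairwise r.reverse PySem.Set.empty j hj).imp_of_mem ?_
      intro a b ha hb hab
      have hga := (pv_mem_bucket r j hj a ha).2
      have hgb := (pv_mem_bucket r j hj b hb).2
      exact Or.inr ⟨by rw [hga, hgb], hab⟩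
    · rw [List.pairwise_reverse]
      rw [List.pairwise_iff_getElem]
      intro i j hi hj hij a ha b hb
      have hga := (pv_mem_bucket r j hj a ha).2
      have hgb := (pv_mem_bucket r i hi b hb).2
      left
      rw [hga, hgb]
      omega
  · -- unseen block vs bucket block
    intro a ha b hb
    have hga := (pv_mem_unseen r a ha).2
    rcases List.mem_flatten.mp hb with ⟨l, hl, hbl⟩
    rcases List.getElem_of_mem (List.mem_reverse.mp hl) with ⟨j, hj, rfl⟩
    have hgb := (pv_mem_bucket r j hj b hbl).2
    have hjlt : j < r.length := by
      have := pv_buckets_length r.reverse PySem.Set.empty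
      rw [List.length_reverse] at this
      omega
    left
    rw [hga, hgb]
    omega

theorem pv_mem_ranking (r : List (List (String × List Int))) (x : Int) :
    x ∈ pvRanking r ↔ (1 ≤ x ∧ x ≤ 39) := by
  unfold pvRanking
  rw [List.mem_append]
  constructor
  · rintro (h | h)
    · exact (pv_mem_unseen r x h).1
    · rcases List.mem_flatten.mp h with ⟨l, hl, hbl⟩
      rcases List.getElem_of_mem (List.mem_reverse.mp hl) with ⟨j, hj, rfl⟩
      exact (pv_mem_bucket r j hj x hbl).1
  · rintro ⟨h1, h2⟩
    cases hf : pvFirstIdx r.reverse x with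
    | none =>
      left
      rw [List.mem_filter]
      refine ⟨PySem.List.mem_pyRange_one.mpr (by omega), ?_⟩
      have hns : x ∉ pvSeen r.reverse PySem.Set.empty := by
        intro hmem
        rcases (pv_seen_mem _ _ _).mp hmem with hc | ⟨hs, _⟩
        · simp [PySem.Set.empty] at hc
        · rw [hf] at hs; simp at hs
      simp only [Bool.not_eq_true']
      rcases Bool.eq_false_or_eq_true (PySem.Set.contains (pvSeen r.reverse PySem.Set.empty) x) with hb | hb
      · exact absurd ((pv_contains_iff _ x).mp hb) hns
      · exact hb
    | some j =>
      right
      have hj : j < (pvBuckets r.reverse PySem.Set.empty).length := by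
        have := pvFirstIdx_lt r.reverse x j hf
        rw [pv_buckets_length]
        exact this
      have hx : x ∈ (pvBuckets r.reverse PySem.Set.empty)[j] :=
        (pv_buckets_mem _ _ j hj x).mpr ⟨h1, h2, by simp [PySem.Set.empty], hf⟩
      exact List.mem_flatten.mpr ⟨(pvBuckets r.reverse PySem.Set.empty)[j],
        List.mem_reverse.mpr (List.getElem_mem hj), hx⟩

theorem pv_ranking_perm (r : List (List (String × List Int))) :
    (pvRanking r).Perm (PySem.List.pyRange 1 (39 + 1) 1) := by
  have hnd1 : (pvRanking r).Nodup :=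
    (pv_ranking_pairwiseQ r).imp (by
      intro a b hQ
      intro hab
      subst hab
      unfold pvR at hQ
      omega)
  have hnd2 := PySem.List.nodup_pyRange_one 1 (39 + 1)
  rw [List.perm_ext_iff_of_nodup hnd1 hnd2]
  intro a
  rw [pv_mem_ranking, PySem.List.mem_pyRange_one]
  omega

-- A's sorted ranked list IS B's ranking (paired with its gaps)
theorem pv_ranked_eq (r : List (List (String × List Int))) :
    PySem.List.sorted2 ((PySem.List.pyRange 1 (39 + 1) 1).map (fun num => (num, pvG r num)))
        (fun x => -x.2) (fun x => x.1) false
      = (pvRanking r).map (fun x => (x, pvG r x)) := by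
  apply pv_uniq
  · exact (PySem.List.sorted2_perm _ _ _ _).trans ((pv_ranking_perm r).map _).symm
  · exact pv_sorted2_pairwise _
  · rw [List.pairwise_map]
    exact pv_ranking_pairwiseQ r

theorem pv_slice_map (f : Int × Int → Int) (l : List Int) (g : Int → Int × Int) (n : Int) :
    (PySem.List.slice (l.map g) none (some n)).map f = (PySem.List.slice l none (some n)).map (fun x => f (g x)) := by
  simp only [PySem.List.slice, List.length_map]
  rw [← List.map_drop, ← List.map_take, List.map_map]
  simp [Function.comp_def]

theorem pv_foldl_append (l : List (List Int)) (init : List Int) :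
    l.foldl (fun r b => r ++ b) init = init ++ l.flatten := by
  induction l generalizing init with
  | nil => simp
  | cons h t ih => simp [ih, List.append_assoc]

-- ===== VERDICT (by name: the statement is the Claim_ definition above) =====

theorem cold_twin_predict_spec : Claim_equal_cold_twin_predict := by
  intro history window n _ _
  unfold Spec_cold_twin_predict cold_twin_predict cold_twin_predict_alt
  by_cases h10 : PySem.List.len history < 10
  · rw [if_pos h10, if_pos h10]
  · rw [if_neg h10, if_neg h10]
    set recent := if PySem.List.len history ≥ window then PySem.List.slice history (some (-window)) none else history with hr
    dsimp only
    -- A's gaps dict has fresh distinct keys, so its items are the mapped range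
    have hitems :
        ((PySem.List.pyRange 1 (39 + 1) 1).foldl
            (fun g num => g.insert num
              ((PySem.List.len recent) -
                (((PySem.List.enumerate recent 0).foldl
                    (fun ls p => ((PySem.Dict.mk p.2).getD "numbers" []).foldl
                      (fun a num => a.insert num p.1) ls)
                    PySem.Dict.empty).getD num (-1))))
            (PySem.Dict.empty : PySem.Dict Int Int)).items
          = (PySem.List.pyRange 1 (39 + 1) 1).map
              (fun num => (num, pvG recent num)) := by
      have h := PySem.Dict.items_foldl_insert_fresh
        (PySem.List.pyRange 1 (39 + 1) 1) (fun a => a)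
        (fun num => (PySem.List.len recent) -
          (((PySem.List.enumerate recent 0).foldl
              (fun ls p => ((PySem.Dict.mk p.2).getD "numbers" []).foldl
                (fun a num => a.insert num p.1) ls)
              PySem.Dict.empty).getD num (-1)))
        PySem.Dict.empty
        (fun a _ => PySem.Dict.contains_empty a)
        (by simpa using PySem.List.nodup_pyRange_one 1 (39 + 1))
      simp only [h]
      apply List.map_congr_left
      intro num _
      rw [pv_gapA_eq recent num]
    rw [hitems, pv_ranked_eq recent]
    -- B side: the scan is (seen, buckets), the append loop is unseen ++ flatten
    rw [pv_fold_eq recent.reverse PySem.Set.empty []]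
    dsimp only
    rw [List.nil_append, pv_foldl_append]
    rw [pv_slice_map (fun x => x.1) (pvRanking recent) (fun x => (x, pvG recent x)) n]
    show PySem.List.sorted ((PySem.List.slice (pvRanking recent) none (some n)).map
        (fun x => ((x, pvG recent x)).1)) (fun x => x) false
      = PySem.List.sorted (PySem.List.slice (pvRanking recent) none (some n)) (fun x => x) false
    have hmap : (PySem.List.slice (pvRanking recent) none (some n)).map
        (fun x => ((x, pvG recent x)).1) = PySem.List.slice (pvRanking recent) none (some n) := by
      simp
    rw [hmap]
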